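-- pv_equiv track=rewrite | github.com/prshnt-git/IRIP_MVP | irip_mvp_starter/backend/app/services/visualization_service.py | _news_signal_chips
-- ===== SOURCE A (Python) =====
-- def _news_signal_chips(news_brief: dict) -> list[dict]:
--     chips: list[dict] = []
--
--     for label in news_brief.get("key_technology_signals", [])[:8]:
--         chips.append(
--             {
--                 "label": label,
--                 "signal_type": "technology",
--                 "weight": None,
--             }
--         )
--
--     for label in news_brief.get("key_company_signals", [])[:6]:
--         chips.append(
--             {
--                 "label": label,
--                 "signal_type": "company",
--                 "weight": None,
--             }
--         )
--
--     for label in news_brief.get("key_region_signals", [])[:6]: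
--         chips.append(
--             {
--                 "label": label,
--                 "signal_type": "region",
--                 "weight": None,
--             }
--         )
--
--     seen = set()
--     deduped = []
--
--     for chip in chips:
--         key = (chip["label"], chip["signal_type"])
--         if key in seen:
--             continue
--         seen.add(key)
--         deduped.append(chip)
--
--     return deduped
-- ===== SOURCE B (Python) =====
-- def _news_signal_chips(news_brief: dict) -> list[dict]:
--     # (label, signal_type) keys can only collide within one field, since each
--     # field gets a distinct signal_type: dedup labels locally, no seen set.
--     def _chips(field: str, signal_type: str, limit: int) -> list[dict]:
--         labels = dict.fromkeys(news_brief.get(field, [])[:limit])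
--         return [{"label": label, "signal_type": signal_type, "weight": None}
--                 for label in labels]
--
--     return (_chips("key_technology_signals", "technology", 8)
--             + _chips("key_company_signals", "company", 6)
--             + _chips("key_region_signals", "region", 6))
-- ===== Notes on version B (the rewrite author's own statement) =====
-- stated objective: simpler
-- what changed: Drops the global seen-set dedup pass entirely: because each field is tagged with a distinct signal_type the (label, signal_type) keys can only collide within one field, so B dedups each capped field list locally with dict.fromkeys and concatenates three independently built chip lists.
import Mathlib
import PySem

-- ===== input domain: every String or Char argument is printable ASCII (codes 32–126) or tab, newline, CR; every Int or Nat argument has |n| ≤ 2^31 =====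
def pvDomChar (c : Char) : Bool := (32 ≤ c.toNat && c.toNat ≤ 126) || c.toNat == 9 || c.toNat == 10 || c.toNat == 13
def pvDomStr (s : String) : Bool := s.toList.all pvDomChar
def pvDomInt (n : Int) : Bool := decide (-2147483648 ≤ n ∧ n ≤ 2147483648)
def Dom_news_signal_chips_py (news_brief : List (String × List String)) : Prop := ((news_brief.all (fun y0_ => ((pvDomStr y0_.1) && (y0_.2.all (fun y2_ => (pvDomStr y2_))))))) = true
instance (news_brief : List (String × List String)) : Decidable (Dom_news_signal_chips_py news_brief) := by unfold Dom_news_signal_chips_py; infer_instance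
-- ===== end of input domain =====

-- B drops A's global seen-set dedup pass: each field carries a distinct signal_type, so
-- (label, signal_type) keys only collide within a field — B dedups each capped field list
-- locally (dict.fromkeys) and concatenates three independent chip lists (objective: simpler).

-- ===== PORT A =====
-- A's dedup step: key = (chip["label"], chip["signal_type"]) read back from the chip dict
def pvStepA (st : PySem.Set (Option (Option String) × Option (Option String)) × List (List (String × Option String)))
    (chip : List (String × Option String)) :
    PySem.Set (Option (Option String) × Option (Option String)) × List (List (String × Option String)) :=
  let key := ((PySem.Dict.mk chip).get? "label", (PySem.Dict.mk chip).get? "signal_type")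
  if st.1.contains key then st else (st.1.add key, st.2 ++ [chip])

def news_signal_chips_py (news_brief : List (String × List String)) : List (List (String × Option String)) :=
  let chips : List (List (String × Option String)) := []
  let chips := (PySem.List.slice ((PySem.Dict.mk news_brief).getD "key_technology_signals" []) none (some 8)).foldl
    (fun acc label => acc ++ [[("label", some label), ("signal_type", some "technology"), ("weight", (none : Option String))]]) chips
  let chips := (PySem.List.slice ((PySem.Dict.mk news_brief).getD "key_company_signals" []) none (some 6)).foldl
    (fun acc label => acc ++ [[("label", some label), ("signal_type", some "company"), ("weight", (none : Option String))]]) chips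
  let chips := (PySem.List.slice ((PySem.Dict.mk news_brief).getD "key_region_signals" []) none (some 6)).foldl
    (fun acc label => acc ++ [[("label", some label), ("signal_type", some "region"), ("weight", (none : Option String))]]) chips
  (chips.foldl pvStepA (PySem.Set.empty, [])).2

-- ===== PORT B =====
def pvChipsFor (news_brief : List (String × List String)) (field signal_type : String) (limit : Int) :
    List (List (String × Option String)) :=
  -- labels = dict.fromkeys(news_brief.get(field, [])[:limit]) — first-occurrence dedup
  (PySem.List.dedup (PySem.List.slice ((PySem.Dict.mk news_brief).getD field []) none (some limit))).map
    (fun label => [("label", some label), ("signal_type", some signal_type), ("weight", (none : Option String))])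

def news_signal_chips_py_alt (news_brief : List (String × List String)) : List (List (String × Option String)) :=
  pvChipsFor news_brief "key_technology_signals" "technology" 8
    ++ pvChipsFor news_brief "key_company_signals" "company" 6
    ++ pvChipsFor news_brief "key_region_signals" "region" 6

-- ===== PRECONDITION & SPEC =====
def Spec_news_signal_chips_py (news_brief : List (String × List String)) (out : List (List (String × Option String))) : Prop := out = news_signal_chips_py_alt news_brief
instance (news_brief : List (String × List String)) (out : List (List (String × Option String))) : Decidable (Spec_news_signal_chips_py news_brief out) := by unfold Spec_news_signal_chips_py; infer_instance

-- ===== CLAIM (what is proved, stated in full; the proofs are below) =====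
def Claim_equal_news_signal_chips_py : Prop := ∀ (news_brief : List (String × List String)), Dom_news_signal_chips_py news_brief → Spec_news_signal_chips_py news_brief (news_signal_chips_py news_brief)

-- ===== LEMMAS AND PROOFS =====

-- appending-one-by-one fold = acc ++ map
theorem pvFoldlAppendMap {α β : Type} (f : α → β) (l : List α) (acc : List β) :
    l.foldl (fun a x => a ++ [f x]) acc = acc ++ l.map f := by
  induction l generalizing acc with
  | nil => simp
  | cons x xs ih => simp [List.foldl, ih]

-- the key A reads back out of a chip, as a function of (label, signal_type)
def pvEmb (ty l : String) : Option (Option String) × Option (Option String) :=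
  (some (some l), some (some ty))

theorem pvEmb_inj {ty l l' : String} (h : pvEmb ty l = pvEmb ty l') : l = l' := by
  simpa [pvEmb, Prod.ext_iff] using h

def pvChip (ty l : String) : List (String × Option String) :=
  [("label", some l), ("signal_type", some ty), ("weight", (none : Option String))]

-- the "fresh" labels of a run: first occurrences not already in D
def pvFresh (D : List String) : List String → List String
  | [] => []
  | l :: ls => if l ∈ D then pvFresh D ls else l :: pvFresh (D ++ [l]) ls

theorem pvUpdate_eq_append_fresh (ls : List String) (D : List String) :
    PySem.Set.update D ls = D ++ pvFresh D ls := by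
  induction ls generalizing D with
  | nil => simp [PySem.Set.update, pvFresh]
  | cons l ls ih =>
    by_cases h : l ∈ D
    · simp [PySem.Set.update, List.foldl, pvFresh, h, ← ih D]
    · have : PySem.Set.add D l = D ++ [l] := PySem.Set.add_of_not_mem h
      simp only [PySem.Set.update, List.foldl, this, pvFresh, h, if_false]
      have := ih (D ++ [l])
      simp only [PySem.Set.update] at this
      simp [this]

theorem pvFresh_nil_eq_dedup (ls : List String) :
    pvFresh [] ls = PySem.List.dedup ls := by
  have h := pvUpdate_eq_append_fresh ls []
  simp only [List.nil_append] at h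
  rw [← h]
  simp [PySem.Set.update, PySem.Set.ofList_eq_foldl]

-- one field's run of A's dedup fold, with a seen set S0 ++ D.map (pvEmb ty) where S0
-- holds no key of this signal_type: the chips appended are exactly the fresh labels' chips
theorem pvFieldRun (ty : String) (labels : List String)
    (S0 : List (Option (Option String) × Option (Option String)))
    (D : List String) (out : List (List (String × Option String)))
    (hS0 : ∀ l : String, pvEmb ty l ∉ S0) :
    (labels.map (pvChip ty)).foldl pvStepA (S0 ++ D.map (pvEmb ty), out)
      = (S0 ++ (D ++ pvFresh D labels).map (pvEmb ty), out ++ (pvFresh D labels).map (pvChip ty)) := by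
  induction labels generalizing D out with
  | nil => simp [pvFresh]
  | cons l ls ih =>
    have hkey : ((PySem.Dict.mk (pvChip ty l)).get? "label",
                 (PySem.Dict.mk (pvChip ty l)).get? "signal_type") = pvEmb ty l := by
      simp [pvChip, pvEmb, PySem.Dict.get?]
    have hmem : PySem.Set.contains (S0 ++ D.map (pvEmb ty)) (pvEmb ty l) = decide (l ∈ D) := by
      rw [Bool.eq_iff_iff, PySem.Set.contains_iff]
      simp only [List.mem_append, List.mem_map, decide_eq_true_eq]
      constructor
      · rintro (h | ⟨l', hl', he⟩)
        · exact absurd h (hS0 l)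
        · exact (pvEmb_inj he.symm) ▸ hl'
      · exact fun h => Or.inr ⟨l, h, rfl⟩
    by_cases h : l ∈ D
    · simp only [List.map_cons, List.foldl_cons, pvStepA, hkey, hmem, h, decide_true, if_true,
        pvFresh]
      exact ih D out
    · have hnot : pvEmb ty l ∉ S0 ++ D.map (pvEmb ty) := by
        simp only [List.mem_append, List.mem_map]
        rintro (hc | ⟨l', hl', he⟩)
        · exact hS0 l hc
        · exact h ((pvEmb_inj he.symm) ▸ hl')
      have hadd : PySem.Set.add (S0 ++ D.map (pvEmb ty)) (pvEmb ty l)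
          = S0 ++ (D ++ [l]).map (pvEmb ty) := by
        rw [PySem.Set.add_of_not_mem hnot]; simp
      simp only [List.map_cons, List.foldl_cons, pvStepA, hkey, hmem, h, decide_false,
        Bool.false_eq_true, if_false, hadd, pvFresh]
      rw [ih (D ++ [l]) (out ++ [pvChip ty l])]
      simp

-- specialization: starting a field with no same-type keys seen and D = []
theorem pvFieldRun0 (ty : String) (labels : List String)
    (S0 : List (Option (Option String) × Option (Option String)))
    (out : List (List (String × Option String)))
    (hS0 : ∀ l : String, pvEmb ty l ∉ S0) :
    (labels.map (pvChip ty)).foldl pvStepA (S0, out)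
      = (S0 ++ (PySem.List.dedup labels).map (pvEmb ty),
         out ++ (PySem.List.dedup labels).map (pvChip ty)) := by
  have h := pvFieldRun ty labels S0 [] out hS0
  simpa [pvFresh_nil_eq_dedup] using h

theorem pvEmb_ne (ty ty' l l' : String) (h : ty ≠ ty') : pvEmb ty l ≠ pvEmb ty' l' := by
  simp [pvEmb, Prod.ext_iff]
  intro _; exact h

-- ===== VERDICT (by name: the statement is the Claim_ definition above) =====
theorem news_signal_chips_py_spec : Claim_equal_news_signal_chips_py := by
  intro news_brief _
  unfold Spec_news_signal_chips_py news_signal_chips_py news_signal_chips_py_alt pvChipsFor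
  simp only [pvFoldlAppendMap, List.nil_append, List.foldl_append]
  set Lt := PySem.List.slice ((PySem.Dict.mk news_brief).getD "key_technology_signals" []) none (some 8) with hLt
  set Lc := PySem.List.slice ((PySem.Dict.mk news_brief).getD "key_company_signals" []) none (some 6) with hLc
  set Lr := PySem.List.slice ((PySem.Dict.mk news_brief).getD "key_region_signals" []) none (some 6) with hLr
  have h1 : ∀ l : String, pvEmb "technology" l ∉ (PySem.Set.empty : PySem.Set _) := by
    intro l h; exact absurd h (List.not_mem_nil)
  have e1 := pvFieldRun0 "technology" Lt PySem.Set.empty [] h1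
  have h2 : ∀ l : String,
      pvEmb "company" l ∉ (PySem.Set.empty : PySem.Set _) ++ (PySem.List.dedup Lt).map (pvEmb "technology") := by
    intro l h
    simp only [PySem.Set.empty, List.nil_append, List.mem_map] at h
    obtain ⟨l', _, he⟩ := h
    exact pvEmb_ne "technology" "company" l' l (by decide) he
  have e2 := pvFieldRun0 "company" Lc
    ((PySem.Set.empty : PySem.Set _) ++ (PySem.List.dedup Lt).map (pvEmb "technology"))
    ([] ++ (PySem.List.dedup Lt).map (pvChip "technology")) h2
  have h3 : ∀ l : String,
      pvEmb "region" l ∉ ((PySem.Set.empty : PySem.Set _) ++ (PySem.List.dedup Lt).map (pvEmb "technology"))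
        ++ (PySem.List.dedup Lc).map (pvEmb "company") := by
    intro l h
    simp only [PySem.Set.empty, List.nil_append, List.mem_append, List.mem_map] at h
    rcases h with ⟨l', _, he⟩ | ⟨l', _, he⟩
    · exact pvEmb_ne "technology" "region" l' l (by decide) he
    · exact pvEmb_ne "company" "region" l' l (by decide) he
  have e3 := pvFieldRun0 "region" Lr
    (((PySem.Set.empty : PySem.Set _) ++ (PySem.List.dedup Lt).map (pvEmb "technology"))
      ++ (PySem.List.dedup Lc).map (pvEmb "company"))
    (([] ++ (PySem.List.dedup Lt).map (pvChip "technology")) ++ (PySem.List.dedup Lc).map (pvChip "company")) h3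
  show (List.foldl pvStepA (List.foldl pvStepA (List.foldl pvStepA (PySem.Set.empty, [])
        (Lt.map (pvChip "technology"))) (Lc.map (pvChip "company"))) (Lr.map (pvChip "region"))).2
      = (PySem.List.dedup Lt).map (pvChip "technology") ++ (PySem.List.dedup Lc).map (pvChip "company")
        ++ (PySem.List.dedup Lr).map (pvChip "region")
  rw [e1, e2, e3]
  simp
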